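-- pv_equiv track=rewrite | github.com/jpb8/CygThonUI | cygdevices/galaxy.py | no_commas
-- ===== SOURCE A (Python) =====
-- def no_commas(string):
--     quotes = False
--     output = ''
--     for char in string:
--         if char == '"' and not quotes:
--             quotes = True
--         elif char == '"' and quotes:
--             quotes = False
--         if quotes == False:
--             output += char
--         if char != ',' and quotes:
--             output += char
--         elif char == "," and quotes:
--             output += "*"
--     return output
-- ===== SOURCE B (Python) =====
-- def no_commas(string):
--     segments = string.split('"')
--     return '"'.join(seg.replace(',', '*') if i % 2 == 1 else seg
--                     for i, seg in enumerate(segments))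
-- ===== Notes on version B (the rewrite author's own statement) =====
-- stated objective: simpler
-- what changed: Replaces A's char-by-char loop (toggled quotes flag, two if-chains, repeated string concatenation) by splitting on the double-quote character, replacing commas with asterisks in the odd (inside-quotes) segments, and rejoining.
import Mathlib
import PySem

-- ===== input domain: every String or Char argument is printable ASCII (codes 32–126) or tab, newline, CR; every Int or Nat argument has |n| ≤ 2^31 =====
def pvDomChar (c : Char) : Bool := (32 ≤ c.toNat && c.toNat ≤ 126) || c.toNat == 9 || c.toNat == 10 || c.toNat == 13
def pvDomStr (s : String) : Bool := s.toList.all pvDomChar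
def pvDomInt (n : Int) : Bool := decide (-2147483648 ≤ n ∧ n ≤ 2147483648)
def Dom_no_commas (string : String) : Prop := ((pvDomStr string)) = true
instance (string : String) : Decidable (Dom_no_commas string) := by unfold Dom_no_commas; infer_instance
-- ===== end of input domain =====

-- B replaces A's stateful char loop by split-on-quote / replace-commas-in-odd-segments / join (simpler; measured faster in Python via bulk string ops).


-- ===== PORT A =====
-- loop body of A, one step: toggle `quotes` on '"', then the two if-chains appending to `output`
def pvStepA (st : Bool × List Char) (char : Char) : Bool × List Char :=
  let quotes := st.1
  let output := st.2
  let quotes := if char == '"' && !quotes then true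
                else if char == '"' && quotes then false
                else quotes
  let output := if quotes == false then output ++ [char] else output
  let output := if char != ',' && quotes then output ++ [char]
                else if char == ',' && quotes then output ++ ['*']
                else output
  (quotes, output)

def no_commas (string : String) : String :=
  String.mk (string.toList.foldl pvStepA (false, [])).2

-- ===== PORT B =====
def no_commas_alt (string : String) : String :=
  let segments := PySem.Chars.splitOn string.toList ['"']
  String.mk (PySem.Chars.join ['"']
    ((PySem.List.enumerate segments).map (fun p =>
      if PySem.Int.mod p.1 2 == 1 then PySem.Chars.replace p.2 [','] ['*'] else p.2)))

-- ===== PRECONDITION & SPEC =====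
def Spec_no_commas (string : String) (out : String) : Prop := out = no_commas_alt string
instance (string : String) (out : String) : Decidable (Spec_no_commas string out) := by unfold Spec_no_commas; infer_instance

-- ===== CLAIM (what is proved, stated in full; the proofs are below) =====
def Claim_equal_no_commas : Prop := ∀ (string : String), Dom_no_commas string → Spec_no_commas string (no_commas string)

-- ===== LEMMAS AND PROOFS =====

-- per-char emission of A's loop (quotes state threaded through)
def pvG : Bool → List Char → List Char
  | _, [] => []
  | q, c :: cs =>
      (if c == '"' then ['"'] else if q && (c == ',') then ['*'] else [c]) ++
      pvG (if c == '"' then !q else q) cs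

-- ',' ↦ '*' on every char
def pvRep (cs : List Char) : List Char := cs.map (fun c => if c == ',' then '*' else c)

def pvApp (q : Bool) (s : List Char) : List Char := if q then pvRep s else s

-- split on '"' with an accumulator for the current segment (spec of splitOn.go)
def pvSplit : List Char → List Char → List (List Char)
  | [], cur => [cur.reverse]
  | c :: cs, cur => if c == '"' then cur.reverse :: pvSplit cs [] else pvSplit cs (c :: cur)

-- join with '"', replacing commas in the segments of the parity given by q
def pvJ : Bool → List (List Char) → List Char
  | _, [] => []
  | q, [s] => pvApp q s
  | q, s :: ss => pvApp q s ++ '"' :: pvJ (!q) ss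

theorem pv_foldA (cs : List Char) : ∀ (q : Bool) (acc : List Char),
    (cs.foldl pvStepA (q, acc)).2 = acc ++ pvG q cs := by
  induction cs with
  | nil => intro q acc; simp [pvG]
  | cons c cs ih =>
    intro q acc
    by_cases hc : c = '"'
    · subst hc
      cases q <;> simp [pvStepA, pvG, ih]
    · by_cases hm : c = ','
      · subst hm
        cases q <;> simp [pvStepA, pvG, ih, List.foldl_cons]
      · have hc' : (c == '"') = false := by simp [hc]
        have hm' : (c == ',') = false := by simp [hm]
        cases q
        · simp [pvStepA, pvG, ih, hc', hm']
        · simp [pvStepA, pvG, ih, hc', hm']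
          simp [hm]

theorem pv_go_eq : ∀ (l cur : List Char) (acc : List (List Char)) (fuel : Nat), l.length ≤ fuel →
    PySem.Chars.splitOn.go ['"'] fuel l cur acc = acc.reverse ++ pvSplit l cur := by
  intro l
  induction l with
  | nil =>
    intro cur acc fuel _
    conv_lhs => rw [PySem.Chars.splitOn.go.eq_def]
    cases fuel <;> simp [pvSplit]
  | cons c cs ih =>
    intro cur acc fuel hf
    cases fuel with
    | zero => simp at hf
    | succ fuel =>
      conv_lhs => rw [PySem.Chars.splitOn.go.eq_def]
      by_cases hc : c = '"'
      · subst hc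
        simp [List.isPrefixOf, pvSplit,
          ih [] (cur.reverse :: acc) fuel (by simpa using hf)]
      · have hc' : ('"' == c) = false := by simp [Ne.symm hc]
        simp [List.isPrefixOf, hc', pvSplit, hc,
          ih (c :: cur) acc fuel (by simpa using hf)]

theorem pv_replace_go : ∀ (l acc : List Char) (fuel : Nat), l.length ≤ fuel →
    PySem.Chars.replace.go [','] ['*'] fuel l acc = acc.reverse ++ pvRep l := by
  intro l
  induction l with
  | nil =>
    intro acc fuel _
    conv_lhs => rw [PySem.Chars.replace.go.eq_def]
    cases fuel <;> simp [pvRep]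
  | cons c cs ih =>
    intro acc fuel hf
    cases fuel with
    | zero => simp at hf
    | succ fuel =>
      conv_lhs => rw [PySem.Chars.replace.go.eq_def]
      by_cases hc : c = ','
      · subst hc
        simp [List.isPrefixOf, pvRep,
          ih ('*' :: acc) fuel (by simpa using hf)]
      · have hc' : (',' == c) = false := by simp [Ne.symm hc]
        simp [List.isPrefixOf, hc', pvRep, hc,
          ih (c :: acc) fuel (by simpa using hf)]

theorem pv_replace_eq (cs : List Char) :
    PySem.Chars.replace cs [','] ['*'] = pvRep cs := by
  simp [PySem.Chars.replace, pv_replace_go cs [] cs.length le_rfl]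

theorem pvSplit_ne_nil (l cur : List Char) : pvSplit l cur ≠ [] := by
  induction l generalizing cur with
  | nil => simp [pvSplit]
  | cons c cs ih => by_cases hc : c = '"' <;> simp [pvSplit, hc, ih]

theorem pv_JSplit (l : List Char) : ∀ (q : Bool) (cur : List Char),
    pvJ q (pvSplit l cur) = pvApp q cur.reverse ++ pvG q l := by
  induction l with
  | nil => intro q cur; simp [pvSplit, pvJ, pvG]
  | cons c cs ih =>
    intro q cur
    by_cases hc : c = '"'
    · subst hc
      rcases h : pvSplit cs ([] : List Char) with _ | ⟨s, ss⟩
      · exact absurd h (pvSplit_ne_nil cs [])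
      · have := ih (!q) []
        rw [h] at this
        simp only [pvApp, pvRep, List.map_nil, List.reverse_nil, ite_self,
          List.nil_append] at this
        simp [pvSplit, pvJ, h, ← this, pvG, pvApp, pvRep]
    · have step : pvApp q (cur.reverse ++ [c]) =
          pvApp q cur.reverse ++ (if q = true ∧ c = ',' then ['*'] else [c]) := by
        cases q <;> by_cases hm : c = ',' <;> simp [pvApp, pvRep, hm]
      simp only [pvSplit, hc, beq_iff_eq, ite_false, ih q (c :: cur),
        List.reverse_cons, step, pvG, List.append_assoc]
      simp

theorem pv_par (s : Int) :
    (PySem.Int.mod (s + 1) 2 == 1) = !(PySem.Int.mod s 2 == 1) := by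
  have h2 : (0 : Int) < 2 := by norm_num
  rw [PySem.Int.mod_eq_emod_of_pos h2, PySem.Int.mod_eq_emod_of_pos h2]
  rcases Int.emod_two_eq s with h | h <;>
    · have h' : (s + 1) % 2 = (if s % 2 = 0 then 1 else 0) := by omega
      simp [h, h']

theorem pv_enum (segs : List (List Char)) : ∀ (s : Int),
    PySem.Chars.join ['"']
      ((PySem.List.enumerate segs s).map (fun p =>
        if PySem.Int.mod p.1 2 == 1 then pvRep p.2 else p.2)) =
    pvJ (PySem.Int.mod s 2 == 1) segs := by
  induction segs with
  | nil => intro s; simp [PySem.List.enumerate, PySem.Chars.join_nil, pvJ]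
  | cons x ss ih =>
    intro s
    rw [PySem.List.enumerate_cons]
    cases ss with
    | nil =>
      simp [PySem.List.enumerate, PySem.Chars.join_singleton, pvJ, pvApp]
    | cons y t =>
      have ihs := ih (s + 1)
      rw [PySem.List.enumerate_cons, List.map_cons] at ihs ⊢
      rw [List.map_cons, PySem.Chars.join_cons_cons, ihs, pv_par]
      simp [pvJ, pvApp, List.append_assoc]

-- ===== VERDICT (by name: the statement is the Claim_ definition above) =====
theorem no_commas_spec : Claim_equal_no_commas := by
  intro string _
  unfold Spec_no_commas no_commas no_commas_alt
  have hsplit : PySem.Chars.splitOn string.toList ['"'] = pvSplit string.toList [] := by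
    simpa [PySem.Chars.splitOn] using
      pv_go_eq string.toList [] [] (string.toList.length + 1) (by omega)
  rw [pv_foldA string.toList false []]
  simp only [hsplit, pv_replace_eq]
  rw [pv_enum (pvSplit string.toList []) 0]
  have h0 : (PySem.Int.mod 0 2 == 1) = false := by decide
  rw [h0, pv_JSplit string.toList false []]
  simp [pvApp]
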